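-- pv_equiv track=rewrite | github.com/cdalaigre/INIT_PROG | TP/tp11/API_matrice1.py | is_triangulaire_inf
-- ===== SOURCE A (Python) =====
-- def get_nb_lignes(la_matrice):
--     """permet de connaître le nombre de lignes d'une matrice
--
--     Args:
--         la_matrice : une matrice
--
--     Returns:
--         int : le nombre de lignes de la matrice
--     """
--     return la_matrice[0]
--
-- def get_nb_colonnes(la_matrice):
--     """permet de connaître le nombre de colonnes d'une matrice
--
--     Args:
--         la_matrice : une matrice
--
--     Returns:
--         int : le nombre de colonnes de la matrice
--     """
--     return la_matrice[1]
--
-- def get_val(la_matrice, ligne, colonne):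
--     """permet de connaître la valeur de l'élément de la matrice dont on connaît
--     le numéro de ligne et le numéro de colonne.
--
--     Args:
--         la_matrice : une matrice
--         ligne (int) : le numéro d'une ligne (la numérotation commence à zéro)
--         colonne (int) : le numéro d'une colonne (la numérotation commence à zéro)
--
--     Returns:
--         la valeur qui est dans la case située à la ligne et la colonne spécifiées
--     """
--     return la_matrice[2][ligne*get_nb_colonnes(la_matrice)+colonne]
--
-- def is_triangulaire_inf(matrice):
--     lst_val=matrice[2]
--     nbl = get_nb_lignes(matrice)
--     nbc = get_nb_colonnes(matrice)
--
--     if nbl != nbc: return False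
--
--     #vérification si les valeurs au dela de la diagonale sont nulles
--     for ligne in range(nbl):
--         for colonne in range(ligne+1,nbc):
--             if get_val(matrice,ligne,colonne) != 0:
--                 return False
--
--     return True
-- ===== SOURCE B (Python) =====
-- def is_triangulaire_inf(matrice):
--     nbl, nbc, vals = matrice
--     if nbl != nbc:
--         return False
--     if nbc <= 0:
--         return True
--     # single flat pass: a nonzero entry whose flat index lands strictly above
--     # the diagonal (column > row, where row, col = divmod(idx, nbc)) refutes it
--     for idx, v in enumerate(vals):
--         if v != 0 and idx % nbc > idx // nbc:
--             return False
--     return True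
-- ===== Notes on version B (the rewrite author's own statement) =====
-- stated objective: alternative
-- what changed: Replaces A's nested (row, column) loops over the strict upper triangle with one linear pass over the flat value list, classifying each stored entry by divmod index arithmetic (idx % n > idx // n) instead of generating upper-triangle indices.
import Mathlib
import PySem

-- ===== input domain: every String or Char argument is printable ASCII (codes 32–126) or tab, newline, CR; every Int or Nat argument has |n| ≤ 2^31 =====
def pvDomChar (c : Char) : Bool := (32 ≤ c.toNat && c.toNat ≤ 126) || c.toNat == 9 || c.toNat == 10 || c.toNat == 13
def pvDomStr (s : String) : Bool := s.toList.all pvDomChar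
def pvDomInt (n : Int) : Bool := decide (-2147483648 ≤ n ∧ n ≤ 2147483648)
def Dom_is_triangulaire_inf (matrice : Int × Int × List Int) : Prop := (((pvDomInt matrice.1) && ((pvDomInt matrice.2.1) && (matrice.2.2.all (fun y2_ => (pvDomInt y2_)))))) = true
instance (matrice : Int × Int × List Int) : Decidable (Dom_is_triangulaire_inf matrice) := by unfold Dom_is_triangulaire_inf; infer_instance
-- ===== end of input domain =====

-- B replaces A's nested upper-triangle loops with one flat enumerate pass classifying indices by divmod (objective: alternative).
-- A raises IndexError on square matrices whose value list is too short and all present upper entries are zero; Pre_ excludes exactly those inputs; B returns True there (it only scans present entries).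


-- ===== PORT A =====
def get_nb_lignes (la_matrice : Int × Int × List Int) : Int := la_matrice.1

def get_nb_colonnes (la_matrice : Int × Int × List Int) : Int := la_matrice.2.1

-- la_matrice[2][...] : out-of-range would be IndexError in Python; Pre_ excludes the inputs that reach it
def get_val (la_matrice : Int × Int × List Int) (ligne colonne : Int) : Int :=
  PySem.List.pyGetD la_matrice.2.2 (ligne * get_nb_colonnes la_matrice + colonne) 0

def is_triangulaire_inf (matrice : Int × Int × List Int) : Bool :=
  let nbl := get_nb_lignes matrice
  let nbc := get_nb_colonnes matrice
  if nbl ≠ nbc then false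
  else
    -- the two for-loops with early 'return False': all upper entries must be 0
    (PySem.List.pyRange 0 nbl 1).all fun ligne =>
      (PySem.List.pyRange (ligne + 1) nbc 1).all fun colonne =>
        get_val matrice ligne colonne == 0

-- ===== PORT B =====
def is_triangulaire_inf_alt (matrice : Int × Int × List Int) : Bool :=
  let nbl := matrice.1
  let nbc := matrice.2.1
  let vals := matrice.2.2
  if nbl ≠ nbc then false
  else if nbc ≤ 0 then true
  else
    -- for idx, v in enumerate(vals): early 'return False' when v ≠ 0 and idx % nbc > idx // nbc
    (PySem.List.enumerate vals).all fun p =>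
      !(p.2 ≠ 0 && PySem.Int.mod p.1 nbc > PySem.Int.floordiv p.1 nbc)

-- ===== PRECONDITION & SPEC =====
-- Exactly the inputs on which Python A raises IndexError: a square n×n header with n ≥ 2,
-- a value list shorter than n²−n (so some strictly-upper index is missing), and every
-- present strictly-upper entry zero (otherwise A returns False before reaching the missing index).
def pvACrashes (matrice : Int × Int × List Int) : Prop :=
  matrice.1 = matrice.2.1 ∧ 2 ≤ matrice.1 ∧
  (matrice.2.2.length : Int) < matrice.1 * matrice.1 - matrice.1 ∧
  ∀ i : Fin matrice.2.2.length,
    i.val % matrice.1.toNat > i.val / matrice.1.toNat → matrice.2.2[i.val] = 0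

-- Pre_ excludes exactly the inputs on which A raises IndexError (nothing on which A returns).
def Pre_is_triangulaire_inf (matrice : Int × Int × List Int) : Prop := ¬ pvACrashes matrice

instance (matrice : Int × Int × List Int) : Decidable (Pre_is_triangulaire_inf matrice) := by
  unfold Pre_is_triangulaire_inf pvACrashes; infer_instance

def pvWitness_is_triangulaire_inf : (Int × Int × List Int) := (2, 2, [1, 0, 3, 4])

def Spec_is_triangulaire_inf (matrice : Int × Int × List Int) (out : Bool) : Prop :=
  out = is_triangulaire_inf_alt matrice

instance (matrice : Int × Int × List Int) (out : Bool) : Decidable (Spec_is_triangulaire_inf matrice out) := by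
  unfold Spec_is_triangulaire_inf; infer_instance

-- ===== CLAIM (what is proved, stated in full; the proofs are below) =====
def Claim_equal_is_triangulaire_inf : Prop := ∀ (matrice : Int × Int × List Int), Dom_is_triangulaire_inf matrice → Pre_is_triangulaire_inf matrice → Spec_is_triangulaire_inf matrice (is_triangulaire_inf matrice)

-- ===== LEMMAS AND PROOFS =====

-- A's nested upper-triangle scan, as a Prop over (row, column) pairs
lemma portA_iff (vals : List Int) (n : Int) :
    ((PySem.List.pyRange 0 n 1).all fun r =>
      (PySem.List.pyRange (r + 1) n 1).all fun c =>
        PySem.List.pyGetD vals (r * n + c) 0 == 0) = true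
  ↔ ∀ r c : Int, 0 ≤ r → r < n → r < c → c < n →
      PySem.List.pyGetD vals (r * n + c) 0 = 0 := by
  simp only [List.all_eq_true, PySem.List.mem_pyRange_one, beq_iff_eq]
  constructor
  · intro h r c h0 hrn hrc hcn
    exact h r ⟨h0, hrn⟩ c ⟨by omega, hcn⟩
  · intro h r hr c hc
    exact h r c hr.1 hr.2 (by omega) hc.2

-- B's flat enumerate pass, as a Prop over positions of the value list
lemma portB_iff (vals : List Int) (n : Int) (hn : 0 < n) :
    ((PySem.List.enumerate vals).all fun p =>
      !(p.2 ≠ 0 && PySem.Int.mod p.1 n > PySem.Int.floordiv p.1 n)) = true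
  ↔ ∀ k : Nat, (hk : k < vals.length) →
      (k : Int) % n > (k : Int) / n → vals[k] = 0 := by
  simp only [List.all_eq_true, PySem.List.mem_enumerate_iff, PySem.Int.mod_eq_emod_of_pos hn,
    PySem.Int.floordiv_eq_ediv_of_pos hn, Bool.not_eq_eq_eq_not, Bool.not_true,
    Bool.and_eq_false_imp, decide_eq_true_eq, decide_eq_false_iff_not, ne_eq]
  constructor
  · intro h k hk hgt
    have := h ((k : Int), vals[k]) ⟨k, hk, by simp⟩
    by_contra hne
    exact absurd hgt (by simpa using this (by simpa using hne))
  · intro h p hp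
    obtain ⟨k, hk, rfl⟩ := hp
    intro hne
    simp only [zero_add, not_lt]
    by_contra hgt
    simp only [not_le] at hgt
    exact hne (h k hk hgt)

-- the two ports agree on every input
lemma ports_eq (matrice : Int × Int × List Int) :
    is_triangulaire_inf matrice = is_triangulaire_inf_alt matrice := by
  obtain ⟨nbl, nbc, vals⟩ := matrice
  by_cases h : nbl = nbc
  · subst h
    by_cases hn : nbl ≤ 0
    · -- both trivially true: A's outer range is empty, B's guard fires
      have h0 : ¬ (0 < nbl) := not_lt.mpr hn
      simp [is_triangulaire_inf, is_triangulaire_inf_alt, get_nb_lignes, get_nb_colonnes,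
        PySem.List.pyRange, hn, h0]
    · rw [not_le] at hn
      simp only [is_triangulaire_inf, is_triangulaire_inf_alt, get_nb_lignes, get_nb_colonnes,
        get_val, ne_eq, not_true_eq_false, if_false, not_le.mpr hn]
      rw [Bool.eq_iff_iff, portA_iff vals nbl, portB_iff vals nbl hn]
      constructor
      · -- flat index k with column > row comes from the pair (k / n, k % n)
        intro hA k hk hgt
        have h0 : (0:Int) ≤ (k:Int) := Int.natCast_nonneg k
        have hmodlt : (k:Int) % nbl < nbl := Int.emod_lt_of_pos _ hn
        have hmod0 : 0 ≤ (k:Int) % nbl := Int.emod_nonneg _ (by omega)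
        have hdiv0 : 0 ≤ (k:Int) / nbl := Int.ediv_nonneg h0 (by omega)
        have hdec : ((k:Int) / nbl) * nbl + (k:Int) % nbl = (k:Int) := by
          rw [mul_comm]; exact Int.mul_ediv_add_emod _ _
        have := hA ((k:Int) / nbl) ((k:Int) % nbl) hdiv0 (by omega) hgt hmodlt
        rw [hdec] at this
        rw [PySem.List.pyGetD_natCast, List.getD_eq_getElem vals 0 hk] at this
        exact this
      · -- an upper-triangle pair (r, c): its flat index r*n+c has r = idx/n, c = idx%n
        intro hB r c h0 hrn hrc hcn
        have hc0 : 0 ≤ c := by omega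
        have hrnl : 0 ≤ r * nbl := mul_nonneg h0 hn.le
        have hidx0 : (0:Int) ≤ r * nbl + c := by omega
        by_cases hlen : r * nbl + c < (vals.length : Int)
        · have hk : (r * nbl + c).toNat < vals.length := by omega
          have hcast : ((r * nbl + c).toNat : Int) = r * nbl + c := Int.toNat_of_nonneg hidx0
          have hdiv : (r * nbl + c) / nbl = r := by
            rw [show r * nbl + c = c + nbl * r by ring,
              Int.add_mul_ediv_left c r (by omega : nbl ≠ 0),
              Int.ediv_eq_zero_of_lt hc0 hcn, zero_add]
          have hmod : (r * nbl + c) % nbl = c := by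
            rw [show r * nbl + c = c + nbl * r by ring, Int.add_mul_emod_self_left]
            exact Int.emod_eq_of_lt hc0 hcn
          have := hB (r * nbl + c).toNat hk (by rw [hcast, hdiv, hmod]; omega)
          rw [← hcast, PySem.List.pyGetD_natCast, List.getD_eq_getElem vals 0 hk]
          exact this
        · -- index past the end of the value list: pyGetD falls back to the default 0
          rw [PySem.List.pyGetD_of_none]
          simp [PySem.List.pyGet?, PySem.List.pyIdx?, hidx0, hlen]
  · simp [is_triangulaire_inf, is_triangulaire_inf_alt, get_nb_lignes, get_nb_colonnes, h]

-- ===== VERDICT (by name: the statement is the Claim_ definition above) =====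
theorem is_triangulaire_inf_spec : Claim_equal_is_triangulaire_inf := by
  intro matrice _ _
  unfold Spec_is_triangulaire_inf
  exact ports_eq matrice
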